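-- pv_equiv track=rewrite | github.com/PedroRuanoS/FP-22-23 | LABs/aulaspraticas.py | num_para_seq_cid
-- ===== SOURCE A (Python) =====
-- def num_para_seq_cid(num):
--     if type(num) != int:
--         raise ValueError('num_para_seq_cid: argumento não inteiro')
--     if num < 0:
--         raise ValueError('num_para_seq_cid: argumento inferior a 0')
--     res = ()
--     while num > 0:
--         digito = num%10
--         if digito%2 == 0:
--             digito += 2
--             if digito == 10:
--                 digito = 0
--         else:
--             digito -= 2
--             if digito == -1:
--                 digito = 9
--         res = (digito,) + res
--         num //= 10
--     return res
-- ===== SOURCE B (Python) =====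
-- DIGIT_MAP = (2, 9, 4, 1, 6, 3, 8, 5, 0, 7)  # even d -> (d+2)%10, odd d -> (d-2)%10
--
-- def num_para_seq_cid(num):
--     if type(num) != int:
--         raise ValueError('num_para_seq_cid: argumento não inteiro')
--     if num < 0:
--         raise ValueError('num_para_seq_cid: argumento inferior a 0')
--     if num == 0:
--         return ()
--     return tuple(DIGIT_MAP[int(c)] for c in str(num))
-- ===== Notes on version B (the rewrite author's own statement) =====
-- stated objective: idiomatic
-- what changed: B replaces the modulo/floor-division extraction loop with its arithmetic branching and quadratic tuple-prepending by a single most-significant-first pass over str(num) through a precomputed per-digit mapping table, with zero special-cased.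
import Mathlib
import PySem

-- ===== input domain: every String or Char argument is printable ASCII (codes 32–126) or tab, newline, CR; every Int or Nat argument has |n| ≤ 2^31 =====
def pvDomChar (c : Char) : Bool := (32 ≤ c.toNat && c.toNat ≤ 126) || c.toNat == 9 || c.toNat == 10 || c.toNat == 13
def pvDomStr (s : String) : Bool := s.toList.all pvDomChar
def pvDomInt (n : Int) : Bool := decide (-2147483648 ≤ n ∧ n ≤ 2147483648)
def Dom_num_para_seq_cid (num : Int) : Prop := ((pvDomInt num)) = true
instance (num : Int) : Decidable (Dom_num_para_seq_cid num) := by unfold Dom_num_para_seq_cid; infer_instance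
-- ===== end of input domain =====

-- B replaces A's while-loop (%10 // 10 extraction, arithmetic branching, tuple prepending)
-- by a single pass over str(num) through a fixed digit-mapping table (idiomatic).


-- ===== PORT A =====
-- the body of A's while-loop: digito = num%10 transformed by the branch chain
def pvTrA (digito : Int) : Int :=
  if PySem.Int.mod digito 2 == 0 then
    (if digito + 2 == 10 then 0 else digito + 2)
  else
    (if digito - 2 == -1 then 9 else digito - 2)

-- A's 'while num > 0' loop, state (num, res); res = (digito,) + res is a cons
def pvALoop (num : Int) (res : List Int) : List Int :=
  if _h : num > 0 then
    pvALoop (PySem.Int.floordiv num 10) (pvTrA (PySem.Int.mod num 10) :: res)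
  else res
termination_by num.toNat
decreasing_by
  rw [PySem.Int.floordiv_eq_ediv_of_pos (by omega : (0:Int) < 10)]
  omega

def num_para_seq_cid (num : Int) : List Int := pvALoop num []

-- ===== PORT B =====
def pvDigitMap : List Int := [2, 9, 4, 1, 6, 3, 8, 5, 0, 7]

-- int(c) on the decimal-digit characters of str(num) is exactly c.toNat - 48
def num_para_seq_cid_alt (num : Int) : List Int :=
  if num == 0 then []
  else (PySem.Int.toChars num).map (fun c => pvDigitMap.getD (c.toNat - 48) 0)

-- ===== PRECONDITION & SPEC =====
-- A raises ValueError on num < 0 (the non-int guard is outside the Int signature)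
def Pre_num_para_seq_cid (num : Int) : Prop := 0 ≤ num
instance (num : Int) : Decidable (Pre_num_para_seq_cid num) := by unfold Pre_num_para_seq_cid; infer_instance
def pvWitness_num_para_seq_cid : Int := (5)

def Spec_num_para_seq_cid (num : Int) (out : List Int) : Prop := out = num_para_seq_cid_alt num
instance (num : Int) (out : List Int) : Decidable (Spec_num_para_seq_cid num out) := by unfold Spec_num_para_seq_cid; infer_instance

-- ===== CLAIM (what is proved, stated in full; the proofs are below) =====
def Claim_equal_num_para_seq_cid : Prop := ∀ (num : Int), Dom_num_para_seq_cid num → Pre_num_para_seq_cid num → Spec_num_para_seq_cid num (num_para_seq_cid num)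

-- ===== LEMMAS AND PROOFS =====

-- B's per-character mapping agrees with A's per-digit transformation
lemma pvTr_eq_map (m : Nat) (hm : m < 10) :
    pvDigitMap.getD ((Nat.digitChar m).toNat - 48) 0 = pvTrA (m : Int) := by
  interval_cases m <;> decide

-- A's loop on a positive Nat produces B's digit map of toDigits, in front of the accumulator
lemma pvALoop_eq (n : Nat) (hn : 0 < n) (acc : List Int) :
    pvALoop (n : Int) acc
      = (Nat.toDigits 10 n).map (fun c => pvDigitMap.getD (c.toNat - 48) 0) ++ acc := by
  induction n using Nat.strong_induction_on generalizing acc with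
  | _ n ih =>
    rw [pvALoop]
    rw [dif_pos (by exact_mod_cast hn)]
    have hm : PySem.Int.mod (n : Int) 10 = ((n % 10 : Nat) : Int) := by
      exact_mod_cast PySem.Int.mod_natCast n 10
    have hd : PySem.Int.floordiv (n : Int) 10 = ((n / 10 : Nat) : Int) := by
      exact_mod_cast PySem.Int.floordiv_natCast n 10
    rw [hm, hd]
    rw [Nat.toDigits_eq_if (by omega)]
    by_cases h10 : n < 10
    · have h0 : n / 10 = 0 := Nat.div_eq_of_lt h10
      have hmod : n % 10 = n := Nat.mod_eq_of_lt h10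
      rw [if_pos h10, h0, hmod]
      rw [pvALoop, dif_neg (by simp)]
      simp only [List.map_cons, List.map_nil, List.singleton_append]
      rw [pvTr_eq_map n h10]
    · have hdiv : 0 < n / 10 := Nat.div_pos (by omega) (by omega)
      rw [if_neg h10]
      rw [ih (n / 10) (Nat.div_lt_self hn (by omega)) hdiv]
      rw [List.map_append, List.append_assoc]
      simp only [List.map_cons, List.map_nil, List.cons_append,
        List.nil_append]
      rw [pvTr_eq_map (n % 10) (Nat.mod_lt n (by omega))]

-- ===== VERDICT (by name: the statement is the Claim_ definition above) =====
theorem num_para_seq_cid_spec : Claim_equal_num_para_seq_cid := by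
  intro num _ hpre
  unfold Spec_num_para_seq_cid num_para_seq_cid num_para_seq_cid_alt
  by_cases h0 : num = 0
  · subst h0
    rw [pvALoop, dif_neg (by omega)]
    simp
  · have hpos : 0 < num := lt_of_le_of_ne hpre (Ne.symm h0)
    rw [if_neg (by simpa using h0)]
    obtain ⟨n, rfl⟩ : ∃ n : Nat, num = (n : Int) := ⟨num.toNat, (Int.toNat_of_nonneg hpre).symm⟩
    have hn : 0 < n := by exact_mod_cast hpos
    rw [pvALoop_eq n hn []]
    simp [PySem.Int.toChars, hpos.not_gt]
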